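-- pv_equiv track=rewrite | github.com/milnus/Corekaburra | Code_to_transfer/consesus_core_genome.py | identify_no_accessory_segments
-- ===== SOURCE A (Python) =====
-- def identify_no_accessory_segments(double_edge_segements, combined_acc_gene_count):
--     # Go through each segment flanked by a core gene with >2 edges and identify segments with no accessory between them
--
--     # Create dict of subsegments of the larger segments
--     # DO not use dict.fromkeys() with value being a list, as this uses the same list in all keys.
--     sub_segment_dict = {key: [] for key in double_edge_segements}
--
--     # Go through segments
--     for segment in double_edge_segements:
--         empty_segment_genes = []
--
--         cur_segment = double_edge_segements[segment]
--         # Check each region of the segment for core genes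
--         for i in range(0, len(cur_segment)-1):
--             core_neighbours = sorted([cur_segment[i], cur_segment[i+1]])
--             core_region = f'{core_neighbours[0]}--{core_neighbours[1]}'
--             # Get accessory genes in region
--             core_region_acc_genes = combined_acc_gene_count[core_region]
--
--             # If number of core genes is zero then add the core pair to current segment and increment the counter for the length of current pair
--             # Else add the segment to the directory of sub segments and reset counters.
--
--             # If core region does not contain accessory genes, add to current segment. Else add the segment and start a new
--             if core_region_acc_genes == 0:
--                 # If  first pair in segment add both, if not first only add the last gene
--                 if len(empty_segment_genes) == 0:
--                     empty_segment_genes += [cur_segment[i], cur_segment[i+1]]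
--                 else:
--                     empty_segment_genes += [cur_segment[i+1]]
--
--             else:
--                 # Check if first pair in subsegment and add first gene as being 'lonely'
--                 if len(empty_segment_genes) == 0:
--                     empty_segment_genes += [cur_segment[i]]
--
--                 # Record the segment and reset the subsegment to contain no core genes
--                 sub_segment_dict[segment].append(empty_segment_genes)
--                 empty_segment_genes = []
--
--             # Check of segment end has been reached and more than two genes are in the segment, if then add the segment
--             if i == len(cur_segment) - 2 and len(empty_segment_genes) >= 2:
--                 sub_segment_dict[segment].append(empty_segment_genes)
--                 empty_segment_genes = []
--             # Check if the second gene in pair is last in segment, and accessory genes are present between second to last and last core gene,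
--             # if then add the last gene as being 'lonely'
--             elif i == len(cur_segment) - 2:
--                 empty_segment_genes += [cur_segment[i + 1]]
--                 sub_segment_dict[segment].append(empty_segment_genes)
--
--     return sub_segment_dict
-- ===== SOURCE B (Python) =====
-- def _region_key(x, y):
--     lo, hi = sorted([x, y])
--     return f'{lo}--{hi}'
--
--
-- def identify_no_accessory_segments(double_edge_segements, combined_acc_gene_count):
--     # Cut each segment at every gene pair with accessory genes between them,
--     # then emit the pieces as slices between consecutive cut points.
--     result = {}
--     for segment, genes in double_edge_segements.items():
--         n = len(genes)
--         if n < 2: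
--             result[segment] = []
--         else:
--             cuts = [i + 1 for i in range(n - 1)
--                     if combined_acc_gene_count[_region_key(genes[i], genes[i + 1])] != 0]
--             bounds = [0] + cuts + [n]
--             result[segment] = [genes[b:e] for b, e in zip(bounds, bounds[1:])]
--     return result
-- ===== Notes on version B (the rewrite author's own statement) =====
-- stated objective: alternative
-- what changed: Replaces A's stateful run-accumulator with end-of-segment special cases by a two-phase cut-and-slice: collect the boundary indices whose region has accessory genes, then emit the subsegments as slices between consecutive boundaries.
import Mathlib
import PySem

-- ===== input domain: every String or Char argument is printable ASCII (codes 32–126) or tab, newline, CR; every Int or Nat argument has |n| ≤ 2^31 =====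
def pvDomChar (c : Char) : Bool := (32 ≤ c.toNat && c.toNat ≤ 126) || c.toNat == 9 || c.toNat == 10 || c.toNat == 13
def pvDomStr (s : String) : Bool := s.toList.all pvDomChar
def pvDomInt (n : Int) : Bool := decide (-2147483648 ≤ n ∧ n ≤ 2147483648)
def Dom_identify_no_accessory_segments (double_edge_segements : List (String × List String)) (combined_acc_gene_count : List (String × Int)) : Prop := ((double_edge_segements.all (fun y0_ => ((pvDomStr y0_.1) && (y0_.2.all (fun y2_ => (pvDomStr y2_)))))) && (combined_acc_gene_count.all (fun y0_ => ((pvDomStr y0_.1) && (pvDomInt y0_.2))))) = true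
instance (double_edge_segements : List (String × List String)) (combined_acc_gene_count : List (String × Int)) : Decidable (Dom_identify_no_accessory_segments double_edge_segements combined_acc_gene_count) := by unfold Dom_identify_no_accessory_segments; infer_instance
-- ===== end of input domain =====

-- B replaces A's stateful run-accumulator (with end-of-segment special cases) by a two-phase
-- cut-and-slice of each segment; same cost, genuinely different decomposition ("alternative").

-- ===== PORT A =====
-- shared helper: the region key  f'{lo}--{hi}'  for the sorted pair, exactly as both Pythons build it
def pvKey (x y : String) : String :=
  let ns := PySem.List.sorted [x, y] (fun s => s) false
  PySem.Str.join "--" [PySem.List.pyGetD ns 0 "", PySem.List.pyGetD ns 1 ""]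

-- the branch of A's loop body that consumes pair i (everything before the end-of-segment checks)
def pvSimp (cntD : PySem.Dict String Int) (cur : List String)
    (st : List String × List (List String)) (i : Int) : List String × List (List String) :=
  let gi := PySem.List.pyGetD cur i ""
  let gi1 := PySem.List.pyGetD cur (i + 1) ""
  let c := (cntD.get? (pvKey gi gi1)).getD 0
  if c = 0 then
    (if st.1.length = 0 then st.1 ++ [gi, gi1] else st.1 ++ [gi1], st.2)
  else
    let e := if st.1.length = 0 then st.1 ++ [gi] else st.1
    ([], st.2 ++ [e])

-- one full iteration of A's inner loop (including the i == len-2 end-of-segment checks)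
def pvAStep (cntD : PySem.Dict String Int) (cur : List String)
    (st : List String × List (List String)) (i : Int) : List String × List (List String) :=
  let gi1 := PySem.List.pyGetD cur (i + 1) ""
  let st1 := pvSimp cntD cur st i
  if i = (cur.length : Int) - 2 ∧ 2 ≤ st1.1.length then
    ([], st1.2 ++ [st1.1])
  else if i = (cur.length : Int) - 2 then
    (st1.1 ++ [gi1], st1.2 ++ [st1.1 ++ [gi1]])
  else st1

-- A's inner loop over  range(0, len(cur_segment)-1)  for one segment
def pvASeg (cntD : PySem.Dict String Int) (cur : List String) : List (List String) :=
  ((PySem.List.pyRange 0 ((cur.length : Int) - 1) 1).foldl (pvAStep cntD cur) ([], [])).2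

def identify_no_accessory_segments (double_edge_segements : List (String × List String)) (combined_acc_gene_count : List (String × Int)) : List (String × List (List String)) :=
  let desD := PySem.Dict.ofList double_edge_segements
  let cntD := PySem.Dict.ofList combined_acc_gene_count
  -- sub_segment_dict = {key: [] for key in double_edge_segements}
  let sub0 : PySem.Dict String (List (List String)) :=
    desD.keys.foldl (fun d k => d.insert k ([] : List (List String))) PySem.Dict.empty
  -- for segment in double_edge_segements: … (appends into sub_segment_dict[segment], written back at loop end)
  (desD.keys.foldl (fun sub segment => sub.insert segment (pvASeg cntD (desD.getD segment []))) sub0).items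

-- ===== PORT B =====
-- B's per-segment computation: cut points, bounds, slices
def pvBSeg (cntD : PySem.Dict String Int) (genes : List String) : List (List String) :=
  let n : Int := genes.length
  if n < 2 then []
  else
    let cuts := ((PySem.List.pyRange 0 (n - 1) 1).filter (fun i =>
        (cntD.get? (pvKey (PySem.List.pyGetD genes i "") (PySem.List.pyGetD genes (i + 1) ""))).getD 0 != 0)).map (fun i => i + 1)
    let bounds := 0 :: (cuts ++ [n])
    (bounds.zip bounds.tail).map (fun be => PySem.List.slice genes (some be.1) (some be.2))

def identify_no_accessory_segments_alt (double_edge_segements : List (String × List String)) (combined_acc_gene_count : List (String × Int)) : List (String × List (List String)) :=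
  let cntD := PySem.Dict.ofList combined_acc_gene_count
  ((PySem.Dict.ofList double_edge_segements).items.foldl
      (fun res p => res.insert p.1 (pvBSeg cntD p.2)) PySem.Dict.empty).items

-- ===== PRECONDITION & SPEC =====
-- Pre_ excludes exactly the inputs where Python A raises KeyError: some adjacent gene pair of a
-- stored segment whose region key is absent from combined_acc_gene_count.
def Pre_identify_no_accessory_segments (double_edge_segements : List (String × List String)) (combined_acc_gene_count : List (String × Int)) : Prop :=
  ∀ p ∈ (PySem.Dict.ofList double_edge_segements).items, ∀ q ∈ p.2.zip p.2.tail,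
    (PySem.Dict.ofList combined_acc_gene_count).contains (pvKey q.1 q.2) = true
instance (double_edge_segements : List (String × List String)) (combined_acc_gene_count : List (String × Int)) : Decidable (Pre_identify_no_accessory_segments double_edge_segements combined_acc_gene_count) := by unfold Pre_identify_no_accessory_segments; infer_instance

def pvWitness_identify_no_accessory_segments : (List (String × List String)) × (List (String × Int)) :=
  ([("s", ["a"]), ("t", [])], [("x", 3)])

def Spec_identify_no_accessory_segments (double_edge_segements : List (String × List String)) (combined_acc_gene_count : List (String × Int)) (out : List (String × List (List String))) : Prop := out = identify_no_accessory_segments_alt double_edge_segements combined_acc_gene_count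
instance (double_edge_segements : List (String × List String)) (combined_acc_gene_count : List (String × Int)) (out : List (String × List (List String))) : Decidable (Spec_identify_no_accessory_segments double_edge_segements combined_acc_gene_count out) := by unfold Spec_identify_no_accessory_segments; infer_instance

-- ===== CLAIM (what is proved, stated in full; the proofs are below) =====
def Claim_equal_identify_no_accessory_segments : Prop := ∀ (double_edge_segements : List (String × List String)) (combined_acc_gene_count : List (String × Int)), Dom_identify_no_accessory_segments double_edge_segements combined_acc_gene_count → Pre_identify_no_accessory_segments double_edge_segements combined_acc_gene_count → Spec_identify_no_accessory_segments double_edge_segements combined_acc_gene_count (identify_no_accessory_segments double_edge_segements combined_acc_gene_count)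

-- ===== LEMMAS AND PROOFS =====

-- spec-side vocabulary
def pvSub (genes : List String) (b e : Nat) : List String := (genes.drop b).take (e - b)
def pvC (cntD : PySem.Dict String Int) (genes : List String) (j : Nat) : Int :=
  (cntD.get? (pvKey (genes.getD j "") (genes.getD (j + 1) ""))).getD 0
def pvCuts (cntD : PySem.Dict String Int) (genes : List String) (m : Nat) : List Nat :=
  ((List.range m).filter (fun j => pvC cntD genes j != 0)).map (· + 1)
def pvBnd (cntD : PySem.Dict String Int) (genes : List String) (m : Nat) : Nat :=
  (pvCuts cntD genes m).getLastD 0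
def pvColl (cntD : PySem.Dict String Int) (genes : List String) (m : Nat) : List (List String) :=
  ((0 :: pvCuts cntD genes m).zip (pvCuts cntD genes m)).map (fun p => pvSub genes p.1 p.2)
def pvE (cntD : PySem.Dict String Int) (genes : List String) (m : Nat) : List String :=
  if pvBnd cntD genes m = m then [] else pvSub genes (pvBnd cntD genes m) (m + 1)
def pvFull (cntD : PySem.Dict String Int) (genes : List String) : List (List String) :=
  ((0 :: (pvCuts cntD genes (genes.length - 1) ++ [genes.length])).zip (pvCuts cntD genes (genes.length - 1) ++ [genes.length])).map
    (fun p => pvSub genes p.1 p.2)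

theorem pvSub_snoc (genes : List String) (b e : Nat) (hb : b ≤ e) (he : e < genes.length) :
    pvSub genes b (e + 1) = pvSub genes b e ++ [genes.getD e ""] := by
  unfold pvSub
  have h1 : e + 1 - b = (e - b) + 1 := by omega
  have h2 : (genes.drop b)[e - b]? = some genes[e] := by
    rw [List.getElem?_drop]
    have hbe : b + (e - b) = e := by omega
    rw [hbe, List.getElem?_eq_getElem he]
  have h3 : genes.getD e "" = genes[e] := List.getD_eq_getElem _ _ he
  rw [h1, List.take_add_one, h2, h3]
  rfl

theorem pvCuts_succ (cntD : PySem.Dict String Int) (genes : List String) (m : Nat) :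
    pvCuts cntD genes (m + 1) =
      if pvC cntD genes m != 0 then pvCuts cntD genes m ++ [m + 1] else pvCuts cntD genes m := by
  unfold pvCuts
  rw [List.range_succ, List.filter_append, List.map_append]
  by_cases h : pvC cntD genes m != 0 <;> simp [h]

theorem pvBnd_le (cntD : PySem.Dict String Int) (genes : List String) (m : Nat) :
    pvBnd cntD genes m ≤ m := by
  have hmem : ∀ x ∈ pvCuts cntD genes m, x ≤ m := by
    intro x hx
    unfold pvCuts at hx
    simp only [List.mem_map, List.mem_filter, List.mem_range] at hx
    obtain ⟨j, ⟨hj, _⟩, rfl⟩ := hx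
    omega
  unfold pvBnd
  have h := List.getLastD_mem_cons (l := pvCuts cntD genes m) (a := 0)
  rcases List.mem_cons.mp h with h0 | hm'
  · rw [h0]; omega
  · exact hmem _ hm' 

theorem pvE_length (cntD : PySem.Dict String Int) (genes : List String) (m : Nat)
    (hm : m + 1 ≤ genes.length) (hne : pvBnd cntD genes m ≠ m) :
    (pvE cntD genes m).length = m + 1 - pvBnd cntD genes m := by
  unfold pvE
  rw [if_neg hne]
  have := pvBnd_le cntD genes m
  simp only [pvSub, List.length_take, List.length_drop]
  omega

theorem pvZip_snoc (l : List Nat) (a x : Nat) :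
    ((a :: (l ++ [x])).zip (l ++ [x])) = ((a :: l).zip l) ++ [(l.getLastD a, x)] := by
  induction l generalizing a with
  | nil => simp
  | cons b l ih =>
    simp only [List.cons_append, List.zip_cons_cons, ih b, List.getLastD_cons]

-- the induction step: A's plain (non-final) loop body advances the invariant state
theorem pvStep (cntD : PySem.Dict String Int) (genes : List String) (m : Nat)
    (hm : m + 2 ≤ genes.length) :
    pvSimp cntD genes (pvE cntD genes m, pvColl cntD genes m) (m : Int) =
      (pvE cntD genes (m + 1), pvColl cntD genes (m + 1)) := by
  have hmlt : m < genes.length := by omega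
  have hm1 : m + 1 < genes.length := by omega
  have hble := pvBnd_le cntD genes m
  have hcast : ((m : Int) + 1) = ((m + 1 : Nat) : Int) := by push_cast; ring
  have hsub0 : pvSub genes m m = [] := by simp [pvSub]
  have hsub1 : pvSub genes m (m + 1) = [genes.getD m ""] := by
    rw [pvSub_snoc genes m m le_rfl hmlt, hsub0]; rfl
  simp only [pvSimp, PySem.List.pyGetD_natCast, hcast]
  have hc : (cntD.get? (pvKey (genes.getD m "") (genes.getD (m + 1) ""))).getD 0 = pvC cntD genes m := rfl
  rw [hc]
  by_cases h0 : pvC cntD genes m = 0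
  · rw [if_pos h0]
    have hcuts : pvCuts cntD genes (m + 1) = pvCuts cntD genes m := by
      rw [pvCuts_succ]; simp [h0]
    have hcoll : pvColl cntD genes (m + 1) = pvColl cntD genes m := by
      unfold pvColl; rw [hcuts]
    have hbnd : pvBnd cntD genes (m + 1) = pvBnd cntD genes m := by
      unfold pvBnd; rw [hcuts]
    by_cases hb : pvBnd cntD genes m = m
    · have hE : pvE cntD genes m = [] := by unfold pvE; rw [if_pos hb]
      have hE1 : pvE cntD genes (m + 1) = pvSub genes m (m + 2) := by
        unfold pvE; rw [hbnd, hb, if_neg (by omega)]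
      rw [hE, hE1, hcoll]
      simp only [List.length_nil, List.nil_append]
      rw [pvSub_snoc genes m (m + 1) (by omega) hm1, hsub1]
      simp
    · have hE : pvE cntD genes m = pvSub genes (pvBnd cntD genes m) (m + 1) := by
        unfold pvE; rw [if_neg hb]
      have hlen : (pvE cntD genes m).length ≠ 0 := by
        rw [pvE_length cntD genes m (by omega) hb]; omega
      have hE1 : pvE cntD genes (m + 1) = pvSub genes (pvBnd cntD genes m) (m + 2) := by
        unfold pvE; rw [hbnd, if_neg (by omega)]
      rw [hcoll, if_neg hlen, hE, hE1,
        pvSub_snoc genes (pvBnd cntD genes m) (m + 1) (by omega) hm1]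
  · rw [if_neg h0]
    have hcuts : pvCuts cntD genes (m + 1) = pvCuts cntD genes m ++ [m + 1] := by
      rw [pvCuts_succ]; simp [h0]
    have hbnd1 : pvBnd cntD genes (m + 1) = m + 1 := by
      unfold pvBnd; rw [hcuts]; simp
    have hE1 : pvE cntD genes (m + 1) = [] := by
      unfold pvE; rw [if_pos hbnd1]
    have hcoll1 : pvColl cntD genes (m + 1) =
        pvColl cntD genes m ++ [pvSub genes (pvBnd cntD genes m) (m + 1)] := by
      unfold pvColl; rw [hcuts, pvZip_snoc, List.map_append]; rfl
    rw [hE1, hcoll1]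
    by_cases hb : pvBnd cntD genes m = m
    · have hE : pvE cntD genes m = [] := by unfold pvE; rw [if_pos hb]
      rw [hE, hb]
      simp [hsub1]
    · have hE : pvE cntD genes m = pvSub genes (pvBnd cntD genes m) (m + 1) := by
        unfold pvE; rw [if_neg hb]
      have hlen : (pvE cntD genes m).length ≠ 0 := by
        rw [pvE_length cntD genes m (by omega) hb]; omega
      rw [if_neg hlen, hE]

-- invariant: folding the plain body over the first m pairs yields (pvE m, pvColl m)
theorem pvInv (cntD : PySem.Dict String Int) (genes : List String) (m : Nat)
    (hm : m + 1 ≤ genes.length) :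
    (PySem.List.pyRange 0 (m : Int) 1).foldl (pvSimp cntD genes) ([], []) =
      (pvE cntD genes m, pvColl cntD genes m) := by
  induction m with
  | zero =>
    rw [show ((0 : Nat) : Int) = 0 from rfl, PySem.List.pyRange_one_eq_nil le_rfl]
    simp [pvE, pvColl, pvCuts, pvBnd]
  | succ m ih =>
    rw [show ((m + 1 : Nat) : Int) = (m : Int) + 1 by push_cast; ring,
      PySem.List.pyRange_one_succ_right (by positivity), List.foldl_append, ih (by omega)]
    simp only [List.foldl_cons, List.foldl_nil]
    exact pvStep cntD genes m (by omega)

-- B's branch for a segment with at least one pair, in invariant vocabulary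
theorem pvB_closed (cntD : PySem.Dict String Int) (genes : List String) (h2 : 2 ≤ genes.length) :
    pvBSeg cntD genes =
      pvColl cntD genes (genes.length - 1) ++
        [pvSub genes (pvBnd cntD genes (genes.length - 1)) genes.length] := by
  unfold pvBSeg
  rw [if_neg (by omega : ¬ ((genes.length : Int) < 2))]
  dsimp only
  rw [show ((genes.length : Int) - 1) = ((genes.length - 1 : Nat) : Int) by omega,
    PySem.List.pyRange_zero_nat, List.filter_map]
  have hpred : ((fun i : Int => (cntD.get? (pvKey (PySem.List.pyGetD genes i "") (PySem.List.pyGetD genes (i + 1) ""))).getD 0 != 0) ∘ (fun k : Nat => (k : Int))) = (fun j : Nat => pvC cntD genes j != 0) := by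
    funext j
    simp only [Function.comp]
    rw [show ((j : Int) + 1) = ((j + 1 : Nat) : Int) by push_cast; ring]
    simp only [PySem.List.pyGetD_natCast]
    rfl
  rw [hpred, List.map_map,
    show ((fun i : Int => i + 1) ∘ fun k : Nat => (k : Int)) = ((fun k : Nat => (k : Int)) ∘ (fun k : Nat => k + 1)) from by funext k; simp,
    ← List.map_map]
  have hcuts : (List.filter (fun j : Nat => pvC cntD genes j != 0) (List.range (genes.length - 1))).map (fun k : Nat => k + 1) = pvCuts cntD genes (genes.length - 1) := rfl
  rw [hcuts]
  have hbounds : (0 : Int) :: ((pvCuts cntD genes (genes.length - 1)).map (fun k : Nat => (k : Int)) ++ [(genes.length : Int)]) = ((0 :: (pvCuts cntD genes (genes.length - 1) ++ [genes.length])).map (fun k : Nat => (k : Int))) := by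
    simp
  rw [hbounds]
  rw [show ((0 :: (pvCuts cntD genes (genes.length - 1) ++ [genes.length])).map (fun k : Nat => (k : Int))).tail = ((pvCuts cntD genes (genes.length - 1) ++ [genes.length]).map (fun k : Nat => (k : Int))) from by simp]
  rw [List.zip_map, List.map_map]
  rw [show ((fun be : Int × Int => PySem.List.slice genes (some be.1) (some be.2)) ∘ Prod.map (fun k : Nat => (k : Int)) (fun k : Nat => (k : Int))) = (fun p : Nat × Nat => pvSub genes p.1 p.2) from by
    funext p; cases p with
    | mk a b => simp [Prod.map, PySem.List.slice_natCast, pvSub]]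
  rw [pvZip_snoc, List.map_append]
  rfl

-- per-segment core: A's loop result equals B's cut-and-slice result
theorem pvSeg_eq (cntD : PySem.Dict String Int) (genes : List String) :
    pvASeg cntD genes = pvBSeg cntD genes := by
  by_cases hlen : genes.length < 2
  · unfold pvASeg pvBSeg
    rw [PySem.List.pyRange_one_eq_nil (by omega : (genes.length : Int) - 1 ≤ 0)]
    simp only [List.foldl_nil]
    rw [if_pos (by omega : ((genes.length : Int) < 2))]
  · rw [Nat.not_lt] at hlen
    unfold pvASeg
    rw [show ((genes.length : Int) - 1) = ((genes.length - 2 : Nat) : Int) + 1 by omega,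
      PySem.List.pyRange_one_succ_right (by positivity), List.foldl_append]
    rw [PySem.List.foldl_congr_mem (PySem.List.pyRange 0 ((genes.length - 2 : Nat) : Int) 1) (pvAStep cntD genes) (pvSimp cntD genes) (([], []) : List String × List (List String)) (by
      intro acc x hx
      rw [PySem.List.mem_pyRange_one] at hx
      have hne : ¬ (x = (genes.length : Int) - 2) := by omega
      unfold pvAStep
      rw [if_neg (fun h => hne h.1), if_neg hne])]
    rw [pvInv cntD genes (genes.length - 2) (by omega)]
    simp only [List.foldl_cons, List.foldl_nil]
    unfold pvAStep
    rw [pvStep cntD genes (genes.length - 2) (by omega)]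
    rw [show genes.length - 2 + 1 = genes.length - 1 by omega]
    rw [pvB_closed cntD genes hlen]
    have hgi1 : PySem.List.pyGetD genes (((genes.length - 2 : Nat) : Int) + 1) "" = genes.getD (genes.length - 1) "" := by
      rw [show (((genes.length - 2 : Nat) : Int) + 1) = ((genes.length - 1 : Nat) : Int) by omega,
        PySem.List.pyGetD_natCast]
    by_cases hb : pvBnd cntD genes (genes.length - 1) = genes.length - 1
    · have hE : pvE cntD genes (genes.length - 1) = [] := by unfold pvE; rw [if_pos hb]
      rw [hE, if_neg (by simp), if_pos (by omega : ((genes.length - 2 : Nat) : Int) = (genes.length : Int) - 2)]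
      rw [hgi1, hb]
      have h5 : pvSub genes (genes.length - 1) genes.length = [genes.getD (genes.length - 1) ""] := by
        rw [show genes.length = genes.length - 1 + 1 by omega]
        simp only [Nat.add_sub_cancel]
        rw [pvSub_snoc genes (genes.length - 1) (genes.length - 1) le_rfl (by omega)]
        simp [pvSub]
      rw [h5]
      simp
    · have hble := pvBnd_le cntD genes (genes.length - 1)
      have hE : pvE cntD genes (genes.length - 1) = pvSub genes (pvBnd cntD genes (genes.length - 1)) (genes.length - 1 + 1) := by
        unfold pvE; rw [if_neg hb]
      have hlen2 : 2 ≤ (pvE cntD genes (genes.length - 1)).length := by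
        rw [pvE_length cntD genes (genes.length - 1) (by omega) hb]; omega
      rw [if_pos ⟨by omega, hlen2⟩, hE]
      rw [show genes.length - 1 + 1 = genes.length by omega]

-- dict plumbing: overwriting inserts over nodup keys rewrite the items pointwise
theorem pvItems_overwrite {ν : Type} (ks : List String) (F G : String → ν) :
    ∀ (pre : List (String × ν)) (d : PySem.Dict String ν),
      d.items = pre ++ ks.map (fun k => (k, G k)) → (∀ p ∈ pre, p.1 ∉ ks) → ks.Nodup →
      (ks.foldl (fun d k => d.insert k (F k)) d).items = pre ++ ks.map (fun k => (k, F k)) := by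
  induction ks with
  | nil => intro pre d hd _ _; simpa using hd
  | cons k ks ih =>
    intro pre d hd hdisj hnd
    obtain ⟨hknotin, hnd'⟩ := List.nodup_cons.mp hnd
    have hcont : d.contains k = true := by
      have hmem : k ∈ d.items.map (fun p => p.1) := by rw [hd]; simp
      rw [PySem.Dict.contains_iff_mem_keys]
      simpa [PySem.Dict.keys] using hmem
    have hpre : pre.map (fun p => if (p.1 == k) = true then (k, F k) else p) = pre := by
      rw [List.map_congr_left (g := id) (fun p hp => by
        have h9 : p.1 ≠ k := fun h => hdisj p hp (by simp [h])
        simp [h9]), List.map_id]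
    have hrest : (ks.map (fun k' => (k', G k'))).map (fun p => if (p.1 == k) = true then (k, F k) else p) = ks.map (fun k' => (k', G k')) := by
      rw [List.map_map]
      exact List.map_congr_left (fun k' hk' => by
        have h9 : k' ≠ k := fun h => hknotin (h ▸ hk')
        simp [h9])
    have hins : (d.insert k (F k)).items = (pre ++ [(k, F k)]) ++ ks.map (fun k' => (k', G k')) := by
      rw [PySem.Dict.items_insert_of_contains d (F k) hcont, hd]
      simp only [List.map_append, List.map_cons]
      rw [hpre, hrest]
      simp
    rw [List.foldl_cons, ih (pre ++ [(k, F k)]) _ hins (by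
        intro p hp
        rcases List.mem_append.mp hp with h | h
        · exact fun hmem => hdisj p h (List.mem_cons_of_mem _ hmem)
        · simp at h
          subst h
          exact hknotin) hnd']
    simp

theorem pvA_items (des : List (String × List String)) (cntD : PySem.Dict String Int) :
    (((PySem.Dict.ofList des).keys.foldl
        (fun sub segment => sub.insert segment (pvASeg cntD ((PySem.Dict.ofList des).getD segment [])))
        ((PySem.Dict.ofList des).keys.foldl (fun d k => d.insert k ([] : List (List String))) PySem.Dict.empty)).items) =
      (PySem.Dict.ofList des).items.map (fun p => (p.1, pvASeg cntD p.2)) := by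
  have hk := PySem.Dict.nodup_keys_ofList des
  have h0 : ((PySem.Dict.ofList des).keys.foldl (fun d k => d.insert k ([] : List (List String))) PySem.Dict.empty).items = (PySem.Dict.ofList des).keys.map (fun k => (k, ([] : List (List String)))) := by
    have hfresh := PySem.Dict.items_foldl_insert_fresh (PySem.Dict.ofList des).keys (fun k => k)
      (fun _ => ([] : List (List String))) PySem.Dict.empty
      (fun a _ => PySem.Dict.contains_empty a) (by simp [hk])
    simpa using hfresh
  have h1 := pvItems_overwrite (PySem.Dict.ofList des).keys
    (fun k => pvASeg cntD ((PySem.Dict.ofList des).getD k [])) (fun _ => [])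
    [] _ (by simpa using h0) (by simp) hk
  rw [h1]
  have hkeys : (PySem.Dict.ofList des).keys = (PySem.Dict.ofList des).items.map (fun p => p.1) := by
    simp [PySem.Dict.keys]
  rw [hkeys, List.map_map]
  simp only [List.nil_append]
  refine List.map_congr_left (fun p hp => ?_)
  have hg := PySem.Dict.getD_of_mem_items (PySem.Dict.ofList des) (k := p.1) (v := p.2)
    (by simpa using hp) hk ([])
  simp [Function.comp, hg]

-- ===== VERDICT (by name: the statement is the Claim_ definition above) =====
theorem identify_no_accessory_segments_spec : Claim_equal_identify_no_accessory_segments := by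
  intro des cnt _hdom _hpre
  unfold Spec_identify_no_accessory_segments
  unfold identify_no_accessory_segments identify_no_accessory_segments_alt
  dsimp only
  rw [pvA_items des (PySem.Dict.ofList cnt)]
  have hB : ((PySem.Dict.ofList des).items.foldl
      (fun res p => res.insert p.1 (pvBSeg (PySem.Dict.ofList cnt) p.2)) PySem.Dict.empty).items =
      (PySem.Dict.ofList des).items.map (fun p => (p.1, pvBSeg (PySem.Dict.ofList cnt) p.2)) := by
    have hk := PySem.Dict.nodup_keys_ofList des
    have h := PySem.Dict.items_foldl_insert_fresh (PySem.Dict.ofList des).items (fun p => p.1)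
      (fun p => pvBSeg (PySem.Dict.ofList cnt) p.2) PySem.Dict.empty
      (fun a _ => PySem.Dict.contains_empty a.1) (by simpa [PySem.Dict.keys] using hk)
    simpa using h
  rw [hB]
  exact List.map_congr_left (fun p _ => by rw [pvSeg_eq])
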